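-- pv_equiv track=rewrite | github.com/neongreen/emilybot | src/emilybot/javascript_executor.py | _extract_syntax_error
-- ===== SOURCE A (Python) =====
-- def _extract_syntax_error(stderr: str) -> str:
--     """Extract meaningful syntax error message from stderr.
--
--     Args:
--         stderr: Standard error output containing syntax error
--
--     Returns:
--         Cleaned syntax error message
--     """
--     # Try to extract the actual syntax error message
--     lines = stderr.split("\n")
--     for line in lines:
--         if "SyntaxError" in line:
--             # Remove "SyntaxError: " prefix if present
--             return line.replace("SyntaxError: ", "").strip()
--
--     # Fallback to first non-empty line
--     for line in lines:
--         if line.strip():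
--             return line.strip()
--
--     return "Invalid JavaScript syntax"
-- ===== SOURCE B (Python) =====
-- def _extract_syntax_error(stderr: str) -> str:
--     """Extract meaningful syntax error message from stderr (single pass)."""
--     first = None
--     for line in stderr.split("\n"):
--         if "SyntaxError" in line:
--             return line.replace("SyntaxError: ", "").strip()
--         if first is None and line.strip():
--             first = line
--     return first.strip() if first is not None else "Invalid JavaScript syntax"
-- ===== Notes on version B (the rewrite author's own statement) =====
-- stated objective: alternative
-- what changed: Replaces A's two sequential scans of the split lines by a single pass that returns immediately on a SyntaxError line while remembering the first non-empty line for the fallback.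
import Mathlib
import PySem

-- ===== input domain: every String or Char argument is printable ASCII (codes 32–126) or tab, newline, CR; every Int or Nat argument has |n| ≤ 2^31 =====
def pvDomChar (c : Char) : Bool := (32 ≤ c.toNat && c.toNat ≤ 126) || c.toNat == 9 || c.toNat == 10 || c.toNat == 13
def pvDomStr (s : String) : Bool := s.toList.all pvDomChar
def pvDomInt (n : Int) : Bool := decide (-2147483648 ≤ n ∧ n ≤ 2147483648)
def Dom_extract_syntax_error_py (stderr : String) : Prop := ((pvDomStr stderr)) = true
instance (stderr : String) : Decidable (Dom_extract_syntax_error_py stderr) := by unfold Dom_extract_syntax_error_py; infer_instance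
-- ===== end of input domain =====

-- B does a single pass (returning on a SyntaxError line, remembering the first non-empty
-- line for the fallback) instead of A's two sequential scans of the split lines.

-- ===== PORT A =====
-- first loop: return the first line containing "SyntaxError", cleaned
def pvALoop1 : List String → Option String
  | [] => none
  | l :: ls =>
    if PySem.Str.isIn "SyntaxError" l then
      some (PySem.Str.strip (PySem.Str.replace l "SyntaxError: " ""))
    else pvALoop1 ls

-- second loop: fallback to first non-empty line, stripped
def pvALoop2 : List String → Option String
  | [] => none
  | l :: ls => if PySem.Str.strip l ≠ "" then some (PySem.Str.strip l) else pvALoop2 ls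

def extract_syntax_error_py (stderr : String) : String :=
  let lines := (PySem.Str.split? stderr "\n").getD []
  match pvALoop1 lines with
  | some r => r
  | none =>
    match pvALoop2 lines with
    | some r => r
    | none => "Invalid JavaScript syntax"

-- ===== PORT B =====
-- single pass with an accumulator holding the first non-empty line seen so far
def pvBLoop : List String → Option String → String
  | [], first =>
    match first with
    | some f => PySem.Str.strip f
    | none => "Invalid JavaScript syntax"
  | l :: ls, first =>
    if PySem.Str.isIn "SyntaxError" l then
      PySem.Str.strip (PySem.Str.replace l "SyntaxError: " "")
    else
      pvBLoop ls (if first.isNone ∧ PySem.Str.strip l ≠ "" then some l else first)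

def extract_syntax_error_py_alt (stderr : String) : String :=
  pvBLoop ((PySem.Str.split? stderr "\n").getD []) none

-- ===== PRECONDITION & SPEC =====
def Spec_extract_syntax_error_py (stderr : String) (out : String) : Prop := out = extract_syntax_error_py_alt stderr
instance (stderr : String) (out : String) : Decidable (Spec_extract_syntax_error_py stderr out) := by unfold Spec_extract_syntax_error_py; infer_instance

-- ===== CLAIM (what is proved, stated in full; the proofs are below) =====
def Claim_equal_extract_syntax_error_py : Prop := ∀ (stderr : String), Dom_extract_syntax_error_py stderr → Spec_extract_syntax_error_py stderr (extract_syntax_error_py stderr)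

-- ===== LEMMAS AND PROOFS =====

-- B's single pass equals A's two passes, for any accumulator state
theorem pvBLoop_eq (ls : List String) :
    ∀ first : Option String,
      pvBLoop ls first =
        match pvALoop1 ls with
        | some r => r
        | none =>
          match first with
          | some f => PySem.Str.strip f
          | none =>
            match pvALoop2 ls with
            | some r => r
            | none => "Invalid JavaScript syntax" := by
  induction ls with
  | nil => intro first; cases first <;> simp [pvBLoop, pvALoop1, pvALoop2]
  | cons l ls ih =>
    intro first
    simp only [pvBLoop, pvALoop1, pvALoop2]
    by_cases hsyn : PySem.Str.isIn "SyntaxError" l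
    · simp only [hsyn, if_true]
    · simp only [hsyn, Bool.false_eq_true, if_false, ih]
      cases first with
      | some f => simp
      | none =>
        by_cases hne : PySem.Str.strip l ≠ ""
        · simp [hne]
        · simp [hne]

-- ===== VERDICT (by name: the statement is the Claim_ definition above) =====
theorem extract_syntax_error_py_spec : Claim_equal_extract_syntax_error_py := by
  intro stderr _
  unfold Spec_extract_syntax_error_py extract_syntax_error_py extract_syntax_error_py_alt
  rw [pvBLoop_eq]
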